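-- pv_equiv track=rewrite | github.com/curtisrobinson2303/codepath-python-notes | mar1breakout/galleryWall.py | organize_exhibition
-- ===== SOURCE A (Python) =====
-- from collections import Counter
--
-- def organize_exhibition(collection):
--     # Count occurrences of each element
--     freq = Counter(collection)
--
--     # Number of rows required is determined by the max frequency of any element
--     num_rows = max(freq.values())
--
--     # Initialize empty rows
--     result = [[] for _ in range(num_rows)]
--
--     # Distribute elements across rows
--     for item, count in freq.items():
--         for i in range(count):
--             result[i].append(item)
--
--     return result
-- ===== SOURCE B (Python) =====
-- def organize_exhibition(collection):
--     freq = {}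
--     for x in collection:
--         freq[x] = freq.get(x, 0) + 1
--     items = list(freq)
--     counts = list(freq.values())
--     rows = []
--     while any(c > 0 for c in counts):
--         rows.append([x for x, c in zip(items, counts) if c > 0])
--         counts = [c - 1 for c in counts]
--     return rows
-- ===== Notes on version B (the rewrite author's own statement) =====
-- stated objective: alternative
-- what changed: B replaces Counter+max+pre-built mutable row table with a layer-peeling loop: it counts with a plain one-pass dict, then repeatedly emits the layer of items whose remaining count is positive while decrementing all counts, so no row count and no row table are ever computed.
import Mathlib
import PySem

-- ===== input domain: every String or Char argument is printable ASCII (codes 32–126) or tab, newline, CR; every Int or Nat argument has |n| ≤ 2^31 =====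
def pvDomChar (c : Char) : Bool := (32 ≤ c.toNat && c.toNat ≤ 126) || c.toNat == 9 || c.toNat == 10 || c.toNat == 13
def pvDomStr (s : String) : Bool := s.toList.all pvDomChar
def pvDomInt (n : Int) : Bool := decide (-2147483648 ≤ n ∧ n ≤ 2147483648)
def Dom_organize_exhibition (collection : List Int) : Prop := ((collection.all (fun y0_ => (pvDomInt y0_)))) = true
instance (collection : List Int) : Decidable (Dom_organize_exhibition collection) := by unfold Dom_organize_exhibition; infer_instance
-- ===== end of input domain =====

-- B replaces Counter+max+mutable row table by layer peeling (dedup + per-item counts,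
-- repeatedly emit the items with positive remaining count and decrement); objective: alternative.

-- ===== PORT A =====
-- result[i].append(item) on the immutable list: read row i, set row i to row ++ [item];
-- i ranges over range(0, count) so i is nonnegative and (inside Pre_) within bounds.
def organize_exhibition (collection : List Int) : List (List Int) :=
  let freq := PySem.Dict.counter collection
  match PySem.List.max? freq.values (fun v => v) with
  | none => []  -- unreachable inside Pre_: Python's max([]) raises ValueError
  | some num_rows =>
    let result := (PySem.List.pyRange 0 num_rows 1).map (fun _ => ([] : List Int))
    freq.items.foldl (fun res p =>
      (PySem.List.pyRange 0 p.2 1).foldl (fun res i =>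
        res.set i.toNat (PySem.List.pyGetD res i [] ++ [p.1])) res) result

-- ===== PORT B =====
-- decrementing all counts strictly lowers the total of their nonneg parts while any is positive
lemma pvPeelDec (counts : List Int) (h : counts.any (fun c => decide (0 < c)) = true) :
    ((counts.map (fun c => c - 1)).map Int.toNat).sum < (counts.map Int.toNat).sum := by
  induction counts with
  | nil => simp at h
  | cons c t ih =>
      simp only [List.any_cons, Bool.or_eq_true, decide_eq_true_eq] at h
      have hle : ∀ (l : List Int), ((l.map (fun c => c - 1)).map Int.toNat).sum ≤ (l.map Int.toNat).sum := by
        intro l; induction l with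
        | nil => simp
        | cons a s ihs => simp only [List.map_cons, List.sum_cons]; omega
      simp only [List.map_cons, List.sum_cons]
      rcases h with h | h
      · have := hle t; omega
      · have := ih h; omega

-- the while-loop of Source B: while any count positive, emit the layer and decrement
def pvPeel (items : List Int) (counts : List Int) : List (List Int) :=
  if h : counts.any (fun c => decide (0 < c)) = true then
    ((items.zip counts).filterMap (fun p => if 0 < p.2 then some p.1 else none))
      :: pvPeel items (counts.map (fun c => c - 1))
  else []
termination_by (counts.map Int.toNat).sum
decreasing_by simpa using pvPeelDec counts h

def organize_exhibition_alt (collection : List Int) : List (List Int) :=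
  let freq := collection.foldl (fun d x => d.insert x (d.getD x 0 + 1)) PySem.Dict.empty
  pvPeel freq.keys freq.values

-- ===== PRECONDITION & SPEC =====
-- Pre_ excludes only the empty list, on which A raises ValueError (max of empty sequence).
def Pre_organize_exhibition (collection : List Int) : Prop := collection ≠ []
instance (collection : List Int) : Decidable (Pre_organize_exhibition collection) := by
  unfold Pre_organize_exhibition; infer_instance
def pvWitness_organize_exhibition : List Int := [1, 2, 1]

def Spec_organize_exhibition (collection : List Int) (out : List (List Int)) : Prop := out = organize_exhibition_alt collection
instance (collection : List Int) (out : List (List Int)) : Decidable (Spec_organize_exhibition collection out) := by unfold Spec_organize_exhibition; infer_instance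

-- ===== CLAIM (what is proved, stated in full; the proofs are below) =====
def Claim_equal_organize_exhibition : Prop := ∀ (collection : List Int), Dom_organize_exhibition collection → Pre_organize_exhibition collection → Spec_organize_exhibition collection (organize_exhibition collection)

-- ===== LEMMAS AND PROOFS =====

-- the canonical value both programs compute: row i = items of count > i, in first-occurrence order
def pvRows (pairs : List (Int × Int)) (m : Nat) : List (List Int) :=
  (List.range m).map (fun (i : Nat) => pairs.filterMap (fun p => if p.2 > ((i : Nat) : Int) then some p.1 else none))

def pvMaxTN (counts : List Int) : Nat := counts.foldr (fun c a => max c.toNat a) 0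

lemma le_pvMaxTN {c : Int} {l : List Int} (h : c ∈ l) : c.toNat ≤ pvMaxTN l := by
  induction l with
  | nil => simp at h
  | cons a t ih =>
      unfold pvMaxTN at *
      rcases List.mem_cons.mp h with rfl | h
      · simp
      · simpa using Or.inr (ih h)

lemma pvMaxTN_le {l : List Int} {n : Nat} (h : ∀ c ∈ l, c.toNat ≤ n) : pvMaxTN l ≤ n := by
  induction l with
  | nil => simp [pvMaxTN]
  | cons a t ih =>
      unfold pvMaxTN at *
      simp only [List.foldr_cons, max_le_iff]
      exact ⟨h a List.mem_cons_self, ih (fun c hc => h c (List.mem_cons_of_mem _ hc))⟩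

lemma any_pos_iff (l : List Int) : l.any (fun c => decide (0 < c)) = true ↔ 0 < pvMaxTN l := by
  induction l with
  | nil => simp [pvMaxTN]
  | cons a t ih =>
      unfold pvMaxTN at *
      simp only [List.any_cons, Bool.or_eq_true, decide_eq_true_eq, List.foldr_cons,
        lt_max_iff, ih]
      omega

lemma pvMaxTN_sub_one (l : List Int) : pvMaxTN (l.map (fun c => c - 1)) = pvMaxTN l - 1 := by
  induction l with
  | nil => simp [pvMaxTN]
  | cons a t ih =>
      unfold pvMaxTN at *
      simp only [List.map_cons, List.foldr_cons]
      omega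

-- pvPeel computes the canonical rows, with m = the max truncated count
lemma pvPeel_eq (N : Nat) : ∀ (counts items : List Int), pvMaxTN counts = N →
    pvPeel items counts = pvRows (items.zip counts) N := by
  induction N with
  | zero =>
      intro counts items h
      rw [pvPeel.eq_def]
      rw [dif_neg (by rw [any_pos_iff, h]; omega)]
      simp [pvRows]
  | succ N ih =>
      intro counts items h
      rw [pvPeel.eq_def]
      rw [dif_pos (by rw [any_pos_iff, h]; omega)]
      have h' : pvMaxTN (counts.map (fun c => c - 1)) = N := by
        rw [pvMaxTN_sub_one, h]
        omega
      rw [ih _ items h']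
      unfold pvRows
      rw [List.range_succ_eq_map, List.map_cons, List.map_map]
      congr 1
      refine List.map_congr_left ?_
      intro a _
      rw [List.zip_map_right, List.filterMap_map]
      refine List.filterMap_congr ?_
      intro p _
      simp only [Function.comp_apply, gt_iff_lt, Prod.map_snd, Prod.map_fst, id_eq,
        Nat.succ_eq_add_one, Nat.cast_add, Nat.cast_one]
      by_cases hc : ((a : Nat) : Int) < p.2 - 1
      · rw [if_pos hc, if_pos (by omega)]
      · rw [if_neg hc, if_neg (by omega)]

-- ===== A-side lemmas (as before) =====

lemma inner_fold_eq (x : Int) (c : Int) (S : List (List Int)) :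
    ((PySem.List.pyRange 0 c 1).foldl (fun res i =>
      res.set i.toNat (PySem.List.pyGetD res i [] ++ [x])) S)
    = ((List.range c.toNat).foldl (fun res k =>
      res.set k (PySem.List.pyGetD res (k : Int) [] ++ [x])) S) := by
  rw [PySem.List.pyRange_one, List.foldl_map]
  simp only [Int.sub_zero, zero_add, Int.toNat_natCast]

lemma inner_length (x : Int) (c : Nat) (R : List (List Int)) :
    ((List.range c).foldl (fun res k =>
      res.set k (PySem.List.pyGetD res (k : Int) [] ++ [x])) R).length = R.length := by
  induction c with
  | zero => rfl
  | succ c ih =>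
      rw [List.range_succ, List.foldl_append]
      simp only [List.foldl_cons, List.foldl_nil, List.length_set]
      exact ih

lemma inner_get? (x : Int) (c : Nat) (R : List (List Int)) (hc : c ≤ R.length) (j : Nat) :
    ((List.range c).foldl (fun res k =>
      res.set k (PySem.List.pyGetD res (k : Int) [] ++ [x])) R)[j]?
    = if j < c then R[j]?.map (· ++ [x]) else R[j]? := by
  induction c generalizing j with
  | zero => simp
  | succ c ih =>
      have hc' : c ≤ R.length := Nat.le_of_succ_le hc
      have hcR : c < R.length := hc
      rw [List.range_succ, List.foldl_append]
      simp only [List.foldl_cons, List.foldl_nil]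
      have hlen := inner_length x c R
      have hval : PySem.List.pyGetD ((List.range c).foldl (fun res k =>
          res.set k (PySem.List.pyGetD res (k : Int) [] ++ [x])) R) (c : Int) []
          = R[c] := by
        rw [PySem.List.pyGetD_of_nonneg _ _ (Int.natCast_nonneg c)]
        simp only [Int.toNat_natCast]
        rw [List.getD_eq_getElem?_getD, ih hc' c, if_neg (Nat.lt_irrefl c),
          List.getElem?_eq_getElem hcR]
        rfl
      rw [hval, List.getElem?_set]
      by_cases h : c = j
      · subst h
        rw [if_pos rfl, if_pos (by rw [hlen]; exact hcR), if_pos (Nat.lt_succ_self c),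
          List.getElem?_eq_getElem hcR]
        rfl
      · rw [if_neg h, ih hc' j]
        by_cases hjc : j < c
        · rw [if_pos hjc, if_pos (by omega)]
        · rw [if_neg hjc, if_neg (by omega)]

lemma fill_get? (L : List (Int × Int)) (R : List (List Int))
    (hL : ∀ p ∈ L, 0 ≤ p.2 ∧ p.2.toNat ≤ R.length) (j : Nat) :
    (L.foldl (fun res p =>
      (PySem.List.pyRange 0 p.2 1).foldl (fun res i =>
        res.set i.toNat (PySem.List.pyGetD res i [] ++ [p.1])) res) R)[j]?
    = R[j]?.map (fun r => r ++ (L.filterMap (fun p => if p.2 > (j : Int) then some p.1 else none))) := by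
  induction L generalizing R with
  | nil =>
      simp only [List.foldl_nil, List.filterMap_nil, List.append_nil]
      cases R[j]? <;> rfl
  | cons p L ih =>
      simp only [List.foldl_cons, List.filterMap_cons]
      rw [inner_fold_eq]
      have hp := hL p List.mem_cons_self
      set S := ((List.range p.2.toNat).foldl (fun res k =>
        res.set k (PySem.List.pyGetD res (k : Int) [] ++ [p.1])) R) with hS
      have hSlen : S.length = R.length := inner_length _ _ _
      have hL' : ∀ q ∈ L, 0 ≤ q.2 ∧ q.2.toNat ≤ S.length := by
        intro q hq; rw [hSlen]; exact hL q (List.mem_cons_of_mem _ hq)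
      rw [ih S hL', hS, inner_get? p.1 p.2.toNat R hp.2 j]
      by_cases hcj : (j : Int) < p.2
      · have hjc : j < p.2.toNat := by omega
        rw [if_pos hjc]
        cases hR : R[j]? with
        | none => rfl
        | some r =>
            simp only [Option.map_some, gt_iff_lt, if_pos hcj]
            rw [List.append_assoc, List.singleton_append]
      · have hjc : ¬ j < p.2.toNat := by omega
        rw [if_neg hjc]
        cases hR : R[j]? with
        | none => rfl
        | some r => simp only [Option.map_some, gt_iff_lt, if_neg hcj]

lemma counts_bounded (collection : List Int) (m : Int)
    (hm : PySem.List.max? (PySem.Dict.counter collection).values (fun v => v) = some m)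
    (p : Int × Int) (hp : p ∈ (PySem.Dict.counter collection).items) :
    0 ≤ p.2 ∧ p.2 ≤ m := by
  have hmax := PySem.List.max?_isMax hm
  have hval : p.2 ∈ (PySem.Dict.counter collection).values := by
    simp only [PySem.Dict.values]
    exact List.mem_map_of_mem hp
  refine ⟨?_, hmax _ hval⟩
  rw [PySem.Dict.items_counter] at hp
  obtain ⟨k, _, hk⟩ := List.mem_map.mp hp
  have : p.2 = (collection.count k : Int) := by rw [← hk]
  rw [this]; positivity

-- A computes the canonical rows with m = the max frequency
lemma a_eq_rows (collection : List Int) (m : Int)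
    (hmax : PySem.List.max? (PySem.Dict.counter collection).values (fun v => v) = some m) :
    organize_exhibition collection = pvRows (PySem.Dict.counter collection).items m.toNat := by
  unfold organize_exhibition
  simp only [hmax]
  have hbound := counts_bounded collection m hmax
  have hRlen : ((PySem.List.pyRange 0 m 1).map (fun _ => ([] : List Int))).length = m.toNat := by
    rw [List.length_map, PySem.List.length_pyRange_one]; omega
  apply List.ext_getElem?
  intro j
  rw [fill_get? _ _ (fun p hp => ⟨(hbound p hp).1, by
        rw [hRlen]; have := hbound p hp; omega⟩) j]
  unfold pvRows
  rw [List.getElem?_map, List.getElem?_map]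
  by_cases hjm : j < m.toNat
  · have hjr : j < (PySem.List.pyRange 0 m 1).length := by
      rw [PySem.List.length_pyRange_one]; omega
    rw [List.getElem?_eq_getElem hjr, List.getElem?_range hjm]
    simp
  · have hjr : ¬ j < (PySem.List.pyRange 0 m 1).length := by
      rw [PySem.List.length_pyRange_one]; omega
    rw [List.getElem?_eq_none (by omega), List.getElem?_eq_none (by simpa using hjm)]
    rfl

-- ===== VERDICT (by name: the statement is the Claim_ definition above) =====
theorem organize_exhibition_spec : Claim_equal_organize_exhibition := by
  intro collection _ hpre
  unfold Spec_organize_exhibition organize_exhibition_alt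
  simp only [PySem.Dict.foldl_insert_getD_add_one_eq_counter]
  have hkeys : (PySem.Dict.counter collection).keys = PySem.Set.ofList collection :=
    PySem.Dict.keys_counter collection
  have hvals : (PySem.Dict.counter collection).values
      = (PySem.Set.ofList collection).map (fun k => (collection.count k : Int)) := by
    simp only [PySem.Dict.values, PySem.Dict.items_counter, List.map_map]
    rfl
  have hgen : ∀ (l : List Int) (f : Int → Int), l.zip (l.map f) = l.map (fun k => (k, f k)) := by
    intro l f
    induction l with
    | nil => rfl
    | cons a t ih => simp only [List.map_cons, List.zip_cons_cons, ih]
  have hzip : (PySem.Dict.counter collection).keys.zip (PySem.Dict.counter collection).values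
      = (PySem.Dict.counter collection).items := by
    rw [hkeys, hvals, hgen, PySem.Dict.items_counter]
  cases hmax : PySem.List.max? (PySem.Dict.counter collection).values (fun v => v) with
  | none =>
      exfalso
      rw [PySem.List.max?_eq_none_iff] at hmax
      rcases List.exists_mem_of_ne_nil collection hpre with ⟨x, hx⟩
      have hxk : x ∈ (PySem.Dict.counter collection).keys := by
        rw [hkeys]
        exact (PySem.Set.mem_ofList _ _).mpr hx
      rw [hvals] at hmax
      rw [List.map_eq_nil_iff] at hmax
      rw [hkeys, hmax] at hxk
      simp at hxk
  | some m =>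
      have hmax' := PySem.List.max?_isMax hmax
      have hmem := PySem.List.max?_mem hmax
      have hmN : pvMaxTN (PySem.Dict.counter collection).values = m.toNat := by
        apply Nat.le_antisymm
        · apply pvMaxTN_le
          intro c hc
          have := hmax' c hc
          omega
        · exact le_pvMaxTN hmem
      rw [pvPeel_eq m.toNat _ _ hmN, hzip, a_eq_rows collection m hmax]
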